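-- pv_equiv track=rewrite | github.com/kazilab/carcinogen_harmonizer | carcinogen_harmonizer/sources/iarc.py | _normalize_js_strings
-- ===== SOURCE A (Python) =====
-- def _normalize_js_strings(text: str) -> str:
--     """Convert single-quoted JS strings to JSON-safe double-quoted strings."""
--     out: list[str] = []
--     i = 0
--     n = len(text)
--     while i < n:
--         ch = text[i]
--         if ch == '"':
--             j = i + 1
--             while j < n:
--                 if text[j] == "\\":
--                     j += 2
--                     continue
--                 if text[j] == '"':
--                     j += 1
--                     break
--                 j += 1
--             out.append(text[i:j])
--             i = j
--         elif ch == "'":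
--             j = i + 1
--             buf: list[str] = []
--             while j < n:
--                 c = text[j]
--                 if c == "\\":
--                     if j + 1 < n:
--                         nxt = text[j + 1]
--                         if nxt == "'":
--                             buf.append("'")
--                         else:
--                             buf.append(c)
--                             buf.append(nxt)
--                         j += 2
--                         continue
--                     j += 1
--                     continue
--                 if c == "'":
--                     j += 1
--                     break
--                 if c == '"':
--                     buf.append('\\"')
--                 else:
--                     buf.append(c)
--                 j += 1
--             out.append('"' + "".join(buf) + '"')
--             i = j
--         else:
--             out.append(ch)
--             i += 1
--     return "".join(out)
-- ===== SOURCE B (Python) =====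
-- def _normalize_js_strings(text: str) -> str:
--     """Convert single-quoted JS strings to JSON-safe double-quoted strings.
--     Flat single-pass state machine (NORMAL / IN_SINGLE / IN_DOUBLE + escaped flag)."""
--     NORMAL, SINGLE, DOUBLE = 0, 1, 2
--     out: list[str] = []
--     state = NORMAL
--     escaped = False
--     for ch in text:
--         if state == NORMAL:
--             if ch == "'":
--                 out.append('"')
--                 state = SINGLE
--             else:
--                 out.append(ch)
--                 if ch == '"':
--                     state = DOUBLE
--         elif state == DOUBLE:
--             if escaped:
--                 out.append(ch)
--                 escaped = False
--             elif ch == "\\":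
--                 out.append(ch)
--                 escaped = True
--             else:
--                 out.append(ch)
--                 if ch == '"':
--                     state = NORMAL
--         else:  # SINGLE
--             if escaped:
--                 escaped = False
--                 if ch == "'":
--                     out.append("'")
--                 else:
--                     out.append("\\")
--                     out.append(ch)
--             elif ch == "\\":
--                 escaped = True
--             elif ch == "'":
--                 out.append('"')
--                 state = NORMAL
--             elif ch == '"':
--                 out.append('\\"')
--             else:
--                 out.append(ch)
--     if state == SINGLE:
--         out.append('"')
--     return "".join(out)
-- ===== Notes on version B (the rewrite author's own statement) =====
-- stated objective: idiomatic
-- what changed: Replaced A's outer loop with nested inner index-scanning loops and slicing by a flat single-pass three-state machine (NORMAL/IN_SINGLE/IN_DOUBLE plus an escaped flag) that appends per character.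
import Mathlib
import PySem

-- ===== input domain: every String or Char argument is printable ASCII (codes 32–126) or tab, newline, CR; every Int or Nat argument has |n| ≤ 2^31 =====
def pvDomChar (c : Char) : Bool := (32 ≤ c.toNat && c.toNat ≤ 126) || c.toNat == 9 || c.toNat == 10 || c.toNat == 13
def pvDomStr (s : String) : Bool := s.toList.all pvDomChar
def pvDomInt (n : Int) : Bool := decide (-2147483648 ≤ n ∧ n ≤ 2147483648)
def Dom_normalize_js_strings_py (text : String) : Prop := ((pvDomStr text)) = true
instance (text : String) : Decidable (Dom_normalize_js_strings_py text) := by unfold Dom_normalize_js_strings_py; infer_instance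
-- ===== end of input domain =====

-- B is a flat three-state machine over one pass, replacing A's nested inner scanning loops; same return value, no speed claim.

-- ===== PORT A =====
-- A's inner double-quote loop: from text[i+1:], collect chars up to and including the
-- closing '"' (backslash skips the next char; a trailing backslash is kept, as the
-- slice text[i:j] with j past the end keeps it); returns (collected chars, remainder).
def aDq : List Char → List Char × List Char
  | [] => ([], [])
  | '\\' :: [] => (['\\'], [])
  | '\\' :: c :: r => let p := aDq r; ('\\' :: c :: p.1, p.2)
  | '"' :: r => (['"'], r)
  | c :: r => let p := aDq r; (c :: p.1, p.2)

-- A's inner single-quote loop: build buf up to (not including) the closing '\'';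
-- a trailing lone backslash is dropped (j += 1 then the loop ends).
def aSq : List Char → List Char × List Char
  | [] => ([], [])
  | '\\' :: [] => ([], [])
  | '\\' :: c :: r => let p := aSq r; ((if c = '\'' then ['\''] else ['\\', c]) ++ p.1, p.2)
  | '\'' :: r => ([], r)
  | '"' :: r => let p := aSq r; ('\\' :: '"' :: p.1, p.2)
  | c :: r => let p := aSq r; (c :: p.1, p.2)

theorem aDq_snd_length : ∀ l : List Char, (aDq l).2.length ≤ l.length := by
  intro l
  induction l using aDq.induct <;> simp_all [aDq] <;> omega

theorem aSq_snd_length : ∀ l : List Char, (aSq l).2.length ≤ l.length := by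
  intro l
  induction l using aSq.induct <;> simp_all [aSq] <;> omega

-- A's outer while loop over the characters of text (out-list join = list append).
def aScan : List Char → List Char
  | [] => []
  | c :: rest =>
    if c = '"' then
      let p := aDq rest
      '"' :: (p.1 ++ aScan p.2)
    else if c = '\'' then
      let p := aSq rest
      '"' :: (p.1 ++ '"' :: aScan p.2)
    else c :: aScan rest
termination_by l => l.length
decreasing_by
  · have := aDq_snd_length rest; simp; omega
  · have := aSq_snd_length rest; simp; omega
  · simp

def normalize_js_strings_py (text : String) : String :=
  String.mk (aScan text.toList)

-- ===== PORT B =====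
-- B's single loop: state 0 = NORMAL, 1 = SINGLE, 2 = DOUBLE, plus the escaped flag;
-- at end of input an open single-quoted string is closed with '"'.
def bGo (state : Nat) (escaped : Bool) : List Char → List Char
  | [] => if state = 1 then ['"'] else []
  | ch :: rest =>
    if state = 0 then
      if ch = '\'' then '"' :: bGo 1 false rest
      else ch :: bGo (if ch = '"' then 2 else 0) false rest
    else if state = 2 then
      if escaped then ch :: bGo 2 false rest
      else if ch = '\\' then ch :: bGo 2 true rest
      else ch :: bGo (if ch = '"' then 0 else 2) false rest
    else
      if escaped then
        (if ch = '\'' then ['\''] else ['\\', ch]) ++ bGo 1 false rest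
      else if ch = '\\' then bGo 1 true rest
      else if ch = '\'' then '"' :: bGo 0 false rest
      else if ch = '"' then '\\' :: '"' :: bGo 1 false rest
      else ch :: bGo 1 false rest

def normalize_js_strings_py_alt (text : String) : String :=
  String.mk (bGo 0 false text.toList)

-- ===== PRECONDITION & SPEC =====
def Spec_normalize_js_strings_py (text : String) (out : String) : Prop := out = normalize_js_strings_py_alt text
instance (text : String) (out : String) : Decidable (Spec_normalize_js_strings_py text out) := by unfold Spec_normalize_js_strings_py; infer_instance

-- ===== CLAIM (what is proved, stated in full; the proofs are below) =====
def Claim_equal_normalize_js_strings_py : Prop := ∀ (text : String), Dom_normalize_js_strings_py text → Spec_normalize_js_strings_py text (normalize_js_strings_py text)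

-- ===== LEMMAS AND PROOFS =====

-- B in DOUBLE state behaves as A's double-quote scan followed by the continuation.
theorem bGo_double (l : List Char) :
    bGo 2 false l = (aDq l).1 ++ bGo 0 false (aDq l).2 := by
  induction l using aDq.induct <;> simp_all [aDq, bGo] <;>
    (rintro rfl; rename_i hnil hcons _; cases ‹List Char› with
      | nil => exact absurd rfl (hnil rfl)
      | cons a r => exact absurd rfl (hcons a r rfl))

-- B in SINGLE state behaves as A's single-quote scan, closing quote, continuation.
theorem bGo_single (l : List Char) :
    bGo 1 false l = (aSq l).1 ++ '"' :: bGo 0 false (aSq l).2 := by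
  induction l using aSq.induct <;> simp_all [aSq, bGo] <;>
    (rintro rfl; rename_i hnil hcons _ _; cases ‹List Char› with
      | nil => exact absurd rfl (hnil rfl)
      | cons a r => exact absurd rfl (hcons a r rfl))

theorem aScan_eq_bGo (l : List Char) : aScan l = bGo 0 false l := by
  induction l using aScan.induct with
  | case1 => simp [aScan, bGo]
  | case2 rest p ih => simp [aScan, bGo, bGo_double]; exact ih
  | case3 rest h p ih => simp [aScan, bGo, bGo_single]; exact ih
  | case4 c rest h h' ih => simp [aScan, bGo, h, h', ih]

-- ===== VERDICT (by name: the statement is the Claim_ definition above) =====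
theorem normalize_js_strings_py_spec : Claim_equal_normalize_js_strings_py := by
  intro text _
  unfold Spec_normalize_js_strings_py normalize_js_strings_py normalize_js_strings_py_alt
  rw [aScan_eq_bGo]
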